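-- pv_equiv track=rewrite | github.com/paykroyd/utilities | problems.py | char_ordered_overlap
-- ===== SOURCE A (Python) =====
-- def char_ordered_overlap(a, b):
--     """
--     Given strings a and b, return a string with the intersection of characters, ordered by a.
--     """
--     common = set(a).intersection(set(b))
--     result = ''
--     for ch in a:
--         if ch in common:
--             result += ch
--             common.remove(ch)
--     return result
-- ===== SOURCE B (Python) =====
-- def char_ordered_overlap(a, b):
--     """
--     Given strings a and b, return a string with the intersection of characters, ordered by a.
--     Peel the head of the remaining input; on a match, purge its duplicates from the
--     remainder instead of maintaining a shrinking intersection set.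
--     """
--     result = ''
--     rest = a
--     while rest:
--         ch = rest[0]
--         if ch in b:
--             result += ch
--             rest = rest[1:].replace(ch, '')
--         else:
--             rest = rest[1:]
--     return result
-- ===== Notes on version B (the rewrite author's own statement) =====
-- stated objective: alternative
-- what changed: Replaced A's shrinking intersection set (set(a)&set(b), removing each emitted char) by a set-free peel-and-purge loop: take the head of the remaining input, and on a match append it and delete all its further occurrences from the remainder with str.replace.
import Mathlib
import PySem

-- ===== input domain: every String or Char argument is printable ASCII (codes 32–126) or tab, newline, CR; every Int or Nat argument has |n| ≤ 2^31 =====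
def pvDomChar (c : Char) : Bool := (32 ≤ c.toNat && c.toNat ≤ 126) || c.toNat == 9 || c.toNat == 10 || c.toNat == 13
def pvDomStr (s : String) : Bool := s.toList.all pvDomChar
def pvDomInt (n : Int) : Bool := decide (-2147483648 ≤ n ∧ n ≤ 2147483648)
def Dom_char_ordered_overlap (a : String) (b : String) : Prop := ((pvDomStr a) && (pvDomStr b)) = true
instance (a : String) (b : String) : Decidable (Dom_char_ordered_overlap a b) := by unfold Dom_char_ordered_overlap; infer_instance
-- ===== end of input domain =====

-- B replaces A's shrinking intersection set by a set-free peel-and-purge loop (objective: alternative, same result).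

-- ===== PORT A =====
-- for ch in a: if ch in common: result += ch; common.remove(ch)
-- common.remove(ch) is guarded by 'ch in common', so it never raises; Set.discard is exact there.
def char_ordered_overlap (a : String) (b : String) : String :=
  let common : PySem.Set Char :=
    PySem.Set.inter (PySem.Set.ofList a.toList) (PySem.Set.ofList b.toList)
  let st := a.toList.foldl
    (fun (st : PySem.Set Char × List Char) ch =>
      if ch ∈ st.1 then (PySem.Set.discard st.1 ch, st.2 ++ [ch]) else st)
    (common, [])
  String.mk st.2

-- ===== PORT B =====
-- while rest: ch = rest[0]; if ch in b: result += ch; rest = rest[1:].replace(ch,'') else rest = rest[1:]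
-- str.replace(ch, '') for a single char deletes every occurrence: exact as List.filter (· ≠ ch).
def altGo (bl : List Char) : List Char → List Char → List Char
  | [], result => result
  | ch :: r, result =>
      if ch ∈ bl then altGo bl (r.filter (fun c => c ≠ ch)) (result ++ [ch])
      else altGo bl r result
termination_by rest _ => rest.length
decreasing_by
  · simp only [List.length_unattach, List.length_cons]
    exact Nat.lt_succ_of_le (le_trans (List.length_filter_le _ _) (le_of_eq (List.length_attach ..)))
  · exact Nat.lt_succ_self _

def char_ordered_overlap_alt (a : String) (b : String) : String :=
  String.mk (altGo b.toList a.toList [])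

-- ===== PRECONDITION & SPEC =====
def Spec_char_ordered_overlap (a : String) (b : String) (out : String) : Prop := out = char_ordered_overlap_alt a b
instance (a : String) (b : String) (out : String) : Decidable (Spec_char_ordered_overlap a b out) := by unfold Spec_char_ordered_overlap; infer_instance

-- ===== CLAIM (what is proved, stated in full; the proofs are below) =====
def Claim_equal_char_ordered_overlap : Prop := ∀ (a : String) (b : String), Dom_char_ordered_overlap a b → Spec_char_ordered_overlap a b (char_ordered_overlap a b)

-- ===== LEMMAS AND PROOFS =====

-- A's loop body, as a recursion on the input list (no accumulator).
def gA (common : PySem.Set Char) : List Char → List Char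
  | [] => []
  | c :: r => if c ∈ common then c :: gA (PySem.Set.discard common c) r else gA common r

-- A's fold equals gA with the accumulator prepended.
theorem foldA_eq_gA (l : List Char) : ∀ (common : PySem.Set Char) (acc : List Char),
    (l.foldl (fun (st : PySem.Set Char × List Char) ch =>
      if ch ∈ st.1 then (PySem.Set.discard st.1 ch, st.2 ++ [ch]) else st) (common, acc)).2
    = acc ++ gA common l := by
  induction l with
  | nil => intro common acc; simp [gA]
  | cons c r ih =>
      intro common acc
      by_cases hc : c ∈ common <;> simp [gA, hc, ih, List.append_assoc]

-- B's loop equals its accumulator-free form.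
theorem altGo_acc_aux (bl : List Char) : ∀ (n : ℕ) (rest : List Char), rest.length ≤ n →
    ∀ (acc : List Char), altGo bl rest acc = acc ++ altGo bl rest [] := by
  intro n
  induction n with
  | zero =>
      intro rest h acc
      have : rest = [] := List.eq_nil_of_length_eq_zero (Nat.le_zero.mp h)
      subst this; simp [altGo]
  | succ n ih =>
      intro rest h acc
      match rest with
      | [] => simp [altGo]
      | ch :: r =>
          simp only [List.length_cons, Nat.succ_le_succ_iff] at h
          by_cases hch : ch ∈ bl
          · rw [altGo, if_pos hch, altGo, if_pos hch]
            simp only [List.nil_append]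
            rw [ih _ (le_trans (List.length_filter_le _ _) h) (acc ++ [ch]),
                ih _ (le_trans (List.length_filter_le _ _) h) [ch], List.append_assoc]
          · rw [altGo, if_neg hch, altGo, if_neg hch,
                ih _ h acc]

theorem altGo_acc (bl : List Char) (rest : List Char) (acc : List Char) :
    altGo bl rest acc = acc ++ altGo bl rest [] :=
  altGo_acc_aux bl rest.length rest le_rfl acc

-- Characters absent from the state set are skipped by gA, so filtering them away changes nothing.
theorem gA_filter (c : Char) (r : List Char) : ∀ (common : PySem.Set Char), c ∉ common →
    gA common r = gA common (r.filter (fun x => x ≠ c)) := by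
  induction r with
  | nil => intro common _; simp
  | cons d r ih =>
      intro common hc
      by_cases hdc : d = c
      · subst hdc
        simp only [List.filter_cons, decide_eq_true_eq]
        rw [if_neg (by simp)]
        rw [gA, if_neg hc]
        exact ih common hc
      · simp only [List.filter_cons, decide_eq_true_eq]
        rw [if_pos (by simp [hdc])]
        by_cases hd : d ∈ common
        · rw [gA, if_pos hd, gA, if_pos hd]
          have : c ∉ PySem.Set.discard common d := by
            simp [PySem.Set.mem_discard]; intro h; exact absurd h hc
          rw [ih _ this]
        · rw [gA, if_neg hd, gA, if_neg hd, ih _ hc]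

-- Main invariant: gA on a set holding exactly the common characters of the remaining
-- input equals B's accumulator-free loop.
theorem gA_eq_altGo (bl : List Char) : ∀ (n : ℕ) (l : List Char), l.length ≤ n →
    ∀ (common : PySem.Set Char), common.Nodup →
    (∀ x, x ∈ common ↔ x ∈ l ∧ x ∈ bl) →
    gA common l = altGo bl l [] := by
  intro n
  induction n with
  | zero =>
      intro l hl common _ _
      have : l = [] := List.eq_nil_of_length_eq_zero (Nat.le_zero.mp hl)
      subst this; simp [gA, altGo]
  | succ n ih =>
      intro l hl common hnd hmem
      match l with
      | [] => simp [gA, altGo]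
      | c :: r =>
          simp only [List.length_cons, Nat.succ_le_succ_iff] at hl
          by_cases hc : c ∈ bl
          · have hcc : c ∈ common := (hmem c).2 ⟨List.mem_cons_self, hc⟩
            rw [gA, if_pos hcc, altGo, if_pos hc, altGo_acc]
            have hnotin : c ∉ PySem.Set.discard common c := by
              simp [PySem.Set.mem_discard]
            rw [gA_filter c r _ hnotin]
            congr 1
            refine ih (r.filter (fun x => x ≠ c)) (le_trans (List.length_filter_le _ _) hl)
              (PySem.Set.discard common c) (PySem.Set.nodup_discard _ _ hnd) ?_
            intro x
            rw [PySem.Set.mem_discard, hmem x]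
            simp only [List.mem_cons, List.mem_filter, decide_eq_true_eq]
            constructor
            · rintro ⟨⟨hx1 | hx1, hx2⟩, hx3⟩
              · exact absurd hx1 hx3
              · exact ⟨⟨hx1, hx3⟩, hx2⟩
            · rintro ⟨⟨hx1, hx3⟩, hx2⟩
              exact ⟨⟨Or.inr hx1, hx2⟩, hx3⟩
          · have hcc : c ∉ common := fun h => hc ((hmem c).1 h).2
            rw [gA, if_neg hcc, altGo, if_neg hc]
            refine ih r hl common hnd ?_
            intro x
            rw [hmem x]
            simp only [List.mem_cons]
            constructor
            · rintro ⟨hx1 | hx1, hx2⟩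
              · exact absurd (hx1 ▸ hx2) hc
              · exact ⟨hx1, hx2⟩
            · rintro ⟨hx1, hx2⟩; exact ⟨Or.inr hx1, hx2⟩

-- ===== VERDICT (by name: the statement is the Claim_ definition above) =====
theorem char_ordered_overlap_spec : Claim_equal_char_ordered_overlap := by
  intro a b _
  unfold Spec_char_ordered_overlap char_ordered_overlap_alt
  show String.mk ((a.toList.foldl
      (fun (st : PySem.Set Char × List Char) ch =>
        if ch ∈ st.1 then (PySem.Set.discard st.1 ch, st.2 ++ [ch]) else st)
      (PySem.Set.inter (PySem.Set.ofList a.toList) (PySem.Set.ofList b.toList), [])).2)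
    = String.mk (altGo b.toList a.toList [])
  rw [foldA_eq_gA, List.nil_append]
  congr 1
  refine gA_eq_altGo b.toList a.toList.length a.toList le_rfl _ ?_ ?_
  · exact PySem.Set.nodup_inter _ _ (PySem.Set.nodup_ofList _)
  · intro x
    rw [PySem.Set.mem_inter]
    simp [PySem.Set.mem_ofList]
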